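-- pv_equiv track=rewrite | github.com/lucasG-btfan/TP3-python | ej8.py | encontrar_repetidos
-- ===== SOURCE A (Python) =====
-- def encontrar_repetidos(lista):
--     repetidos = []
--     vistos = set()
--
--     for elemento in lista:
--         if elemento in vistos and elemento not in repetidos:
--             repetidos.append(elemento)
--         vistos.add(elemento)
--
--     return repetidos
-- ===== SOURCE B (Python) =====
-- def encontrar_repetidos(lista):
--     posiciones = {}
--     for i, x in enumerate(lista):
--         posiciones.setdefault(x, []).append(i)
--     pares = [(idxs[1], x) for x, idxs in posiciones.items() if len(idxs) >= 2]
--     pares.sort(key=lambda par: par[0])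
--     return [x for _, x in pares]
-- ===== Notes on version B (the rewrite author's own statement) =====
-- stated objective: alternative
-- what changed: Replaces the stateful scan with a membership test on the growing result list by an index-grouping dict built in one pass, then emits each element with >= 2 occurrences at its second-occurrence index, sorted by that index.
import Mathlib
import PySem

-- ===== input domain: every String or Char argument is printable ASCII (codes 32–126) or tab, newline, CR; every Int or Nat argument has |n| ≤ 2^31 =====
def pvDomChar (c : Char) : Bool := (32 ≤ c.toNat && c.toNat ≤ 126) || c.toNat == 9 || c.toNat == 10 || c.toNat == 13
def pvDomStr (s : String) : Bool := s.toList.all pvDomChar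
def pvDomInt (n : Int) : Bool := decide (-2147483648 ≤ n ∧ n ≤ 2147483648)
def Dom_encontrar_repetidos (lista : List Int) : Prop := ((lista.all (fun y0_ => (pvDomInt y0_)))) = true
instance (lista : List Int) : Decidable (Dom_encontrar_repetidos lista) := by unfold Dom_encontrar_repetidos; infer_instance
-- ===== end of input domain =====

-- B replaces A's stateful scan (seen-set + membership test on the growing result) by a dict
-- grouping each element's indices, emitting elements with >= 2 occurrences sorted by their
-- second-occurrence index (objective: alternative).

-- ===== PORT A =====
def encontrar_repetidos (lista : List Int) : List Int :=
  (lista.foldl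
    (fun (s : List Int × PySem.Set Int) elemento =>
      ((if PySem.Set.contains s.2 elemento && !(s.1.contains elemento)
        then s.1 ++ [elemento] else s.1),
       PySem.Set.add s.2 elemento))
    ([], PySem.Set.empty)).1

-- ===== PORT B =====
def encontrar_repetidos_alt (lista : List Int) : List Int :=
  let posiciones : PySem.Dict Int (List Int) :=
    (PySem.List.enumerate lista).foldl
      (fun d p => d.modify p.2 [] (fun idxs => idxs ++ [p.1])) PySem.Dict.empty
  let pares : List (Int × Int) :=
    posiciones.items.filterMap (fun kv =>
      match kv.2 with                      -- if len(idxs) >= 2: (idxs[1], x)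
      | _ :: i2 :: _ => some (i2, kv.1)
      | _ => none)
  (PySem.List.sorted pares (fun par => par.1) false).map (fun par => par.2)

-- ===== PRECONDITION & SPEC =====
def Spec_encontrar_repetidos (lista : List Int) (out : List Int) : Prop := out = encontrar_repetidos_alt lista
instance (lista : List Int) (out : List Int) : Decidable (Spec_encontrar_repetidos lista out) := by unfold Spec_encontrar_repetidos; infer_instance

-- ===== CLAIM (what is proved, stated in full; the proofs are below) =====
def Claim_equal_encontrar_repetidos : Prop := ∀ (lista : List Int), Dom_encontrar_repetidos lista → Spec_encontrar_repetidos lista (encontrar_repetidos lista)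

-- ===== LEMMAS AND PROOFS =====

-- second occurrences of `l` (continuation form: `pre` already processed, next index `i`), as (index, element) pairs
def specP (pre l : List Int) (i : Int) : List (Int × Int) :=
  match l with
  | [] => []
  | x :: t =>
      if pre.count x = 1 then (i, x) :: specP (pre ++ [x]) t (i + 1)
      else specP (pre ++ [x]) t (i + 1)

-- indices at which x occurs in l, in order
def occIdx (l : List Int) (x : Int) : List Int :=
  ((PySem.List.enumerate l).filter (fun p => p.2 == x)).map (fun p => p.1)

lemma occIdx_append (l : List Int) (a x : Int) :
    occIdx (l ++ [a]) x = occIdx l x ++ (if a == x then [(l.length : Int)] else []) := by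
  simp only [occIdx, PySem.List.enumerate_append, PySem.List.enumerate_cons,
    PySem.List.enumerate_nil, List.filter_append, List.map_append]
  by_cases h : a == x <;> simp [h]

lemma length_occIdx (l : List Int) (x : Int) : (occIdx l x).length = l.count x := by
  simp only [occIdx, List.length_map, ← List.countP_eq_length_filter]
  conv_rhs => rw [← PySem.List.map_snd_enumerate l 0]
  rw [List.count_eq_countP, List.countP_map]
  simp only [Function.comp_def]

lemma count_take_lt (l : List Int) (x : Int) (k : Nat) (hk : k < l.length) (hx : l[k] = x) :
    (l.take k).count x < l.count x := by
  conv_rhs => rw [← List.take_append_drop k l]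
  rw [List.count_append, List.drop_eq_getElem_cons hk, hx, List.count_cons_self]
  omega

lemma getElem?_occIdx (l : List Int) (x : Int) (n : Nat) (j : Int) :
    (occIdx l x)[n]? = some j ↔
      ∃ k : Nat, j = (k : Int) ∧ ∃ hk : k < l.length, l[k] = x ∧ (l.take k).count x = n := by
  induction l using List.reverseRecOn generalizing n j with
  | nil => simp [occIdx, PySem.List.enumerate_nil]
  | append_singleton l a ih =>
    rw [occIdx_append]
    by_cases hn : n < l.count x
    · rw [List.getElem?_append_left (by rw [length_occIdx]; exact hn), ih]
      constructor
      · rintro ⟨k, hj, hk, hx, hc⟩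
        exact ⟨k, hj, by simp; omega,
          by rw [List.getElem_append_left hk]; exact hx,
          by rw [List.take_append_of_le_length (le_of_lt hk)]; exact hc⟩
      · rintro ⟨k, hj, hk, hx, hc⟩
        simp only [List.length_append, List.length_singleton] at hk
        rcases Nat.lt_or_ge k l.length with h | h
        · exact ⟨k, hj, h, by rw [List.getElem_append_left h] at hx; exact hx,
            by rw [List.take_append_of_le_length (le_of_lt h)] at hc; exact hc⟩
        · have hke : k = l.length := by omega
          subst hke
          rw [List.take_append_of_le_length (le_refl _), List.take_length] at hc
          omega
    · rw [List.getElem?_append_right (by rw [length_occIdx]; omega), length_occIdx]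
      by_cases ha : a == x
      · have hax : a = x := by simpa using ha
        subst hax
        simp only [ha, if_pos]
        constructor
        · intro h
          have hnj : n - l.count a = 0 ∧ j = (l.length : Int) := by
            cases h' : n - l.count a with
            | zero => rw [h'] at h; simp at h; exact ⟨rfl, h.symm⟩
            | succ m => rw [h'] at h; simp at h
          refine ⟨l.length, hnj.2, by simp, ?_, ?_⟩
          · rw [List.getElem_append_right (le_refl _)]; simp
          · rw [List.take_append_of_le_length (le_refl _), List.take_length]
            omega
        · rintro ⟨k, hj, hk, hx, hc⟩
          simp only [List.length_append, List.length_singleton] at hk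
          rcases Nat.lt_or_ge k l.length with h | h
          · rw [List.take_append_of_le_length (le_of_lt h)] at hc
            rw [List.getElem_append_left h] at hx
            have := count_take_lt l a k h hx
            omega
          · have hke : k = l.length := by omega
            subst hke
            rw [List.take_append_of_le_length (le_refl _), List.take_length] at hc
            have h0 : n - l.count a = 0 := by omega
            rw [h0]
            simp [hj]
      · simp only [Bool.not_eq_true] at ha
        simp only [ha, Bool.false_eq_true, if_false, List.getElem?_nil, reduceCtorEq, false_iff]
        rintro ⟨k, hj, hk, hx, hc⟩
        simp only [List.length_append, List.length_singleton] at hk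
        rcases Nat.lt_or_ge k l.length with h | h
        · rw [List.take_append_of_le_length (le_of_lt h)] at hc
          rw [List.getElem_append_left h] at hx
          have := count_take_lt l x k h hx
          omega
        · have hke : k = l.length := by omega
          subst hke
          rw [List.getElem_append_right (le_refl _)] at hx
          simp at hx
          simp [hx] at ha

lemma mem_specP (pre l : List Int) (i : Int) (j x : Int) :
    (j, x) ∈ specP pre l i ↔
      ∃ k : Nat, j = i + (k : Int) ∧ ∃ hk : k < l.length, l[k] = x ∧ (pre ++ l.take k).count x = 1 := by
  induction l generalizing pre i with
  | nil => simp [specP]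
  | cons a t ih =>
    constructor
    · intro h
      have hmem : (j, x) = (i, a) ∧ pre.count a = 1 ∨ (j, x) ∈ specP (pre ++ [a]) t (i + 1) := by
        by_cases hc : pre.count a = 1
        · rw [specP, if_pos hc] at h
          rcases List.mem_cons.1 h with h0 | h1
          · exact Or.inl ⟨h0, hc⟩
          · exact Or.inr h1
        · rw [specP, if_neg hc] at h
          exact Or.inr h
      rcases hmem with ⟨h0, hc⟩ | h1
      · obtain ⟨hj0, hx0⟩ := Prod.mk.injEq j x i a ▸ h0
        subst hj0; subst hx0
        exact ⟨0, by omega, by simp, by simp, by simpa using hc⟩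
      · obtain ⟨k, hj, hk, hx, hcnt⟩ := (ih (pre ++ [a]) (i + 1)).1 h1
        refine ⟨k + 1, by push_cast; omega, by simp; omega, by simpa using hx, ?_⟩
        rw [List.take_succ_cons, List.append_cons]
        exact hcnt
    · rintro ⟨k, hj, hk, hx, hcnt⟩
      cases k with
      | zero =>
        simp only [List.take_zero, List.append_nil] at hcnt
        simp only [List.getElem_cons_zero] at hx
        subst hx
        rw [specP, if_pos (by simpa using hcnt)]
        simp [hj]
      | succ m =>
        have hm : (j, x) ∈ specP (pre ++ [a]) t (i + 1) := by
          refine (ih (pre ++ [a]) (i + 1)).2 ⟨m, by push_cast at hj ⊢; omega, by simp at hk; omega,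
            by simpa using hx, ?_⟩
          rw [List.take_succ_cons, List.append_cons] at hcnt
          exact hcnt
        by_cases hc : pre.count a = 1
        · rw [specP, if_pos hc]; exact List.mem_cons_of_mem _ hm
        · rw [specP, if_neg hc]; exact hm

lemma fst_le_of_mem_specP (pre l : List Int) (i : Int) (p : Int × Int) (h : p ∈ specP pre l i) :
    i ≤ p.1 := by
  obtain ⟨k, hj, _⟩ := (mem_specP pre l i p.1 p.2).1 h
  omega

lemma pairwise_specP (pre l : List Int) (i : Int) :
    (specP pre l i).Pairwise (fun p q => p.1 < q.1) := by
  induction l generalizing pre i with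
  | nil => simp [specP]
  | cons a t ih =>
    rw [specP]
    split_ifs with hc
    · refine List.Pairwise.cons ?_ (ih _ _)
      intro q hq
      have := fst_le_of_mem_specP _ _ _ _ hq
      simp only
      omega
    · exact ih _ _

lemma foldA_eq (l : List Int) : ∀ (pre : List Int) (i : Int) (rep : List Int),
    (∀ x, x ∈ rep ↔ 2 ≤ pre.count x) → ∀ (vis : PySem.Set Int),
    (∀ x, x ∈ vis ↔ x ∈ pre) →
    (l.foldl
      (fun (s : List Int × PySem.Set Int) elemento =>
        ((if PySem.Set.contains s.2 elemento && !(s.1.contains elemento)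
          then s.1 ++ [elemento] else s.1),
         PySem.Set.add s.2 elemento))
      (rep, vis)).1 = rep ++ (specP pre l i).map (fun p => p.2) := by
  have hmemb : ∀ (s : List Int) (x : Int), s.contains x = decide (x ∈ s) := by
    intro s x; by_cases h : x ∈ s <;> simp [h]
  induction l with
  | nil => intro pre i rep _ vis _; simp [specP]
  | cons a t ih =>
    intro pre i rep hrep vis hvis
    have hvis' : ∀ x, x ∈ PySem.Set.add vis a ↔ x ∈ pre ++ [a] := by
      intro x
      rw [PySem.Set.mem_add]
      simp [hvis x]
    have hca : PySem.Set.contains vis a = decide (a ∈ pre) := by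
      rw [PySem.Set.contains_eq_listContains, hmemb, decide_eq_decide.mpr (hvis a)]
    have hra : rep.contains a = decide (2 ≤ pre.count a) := by
      rw [hmemb, decide_eq_decide.mpr (hrep a)]
    rw [List.foldl_cons]
    by_cases hc : pre.count a = 1
    · have hcond : (PySem.Set.contains vis a && !(rep.contains a)) = true := by
        rw [hca, hra]
        simp only [Bool.and_eq_true, decide_eq_true_eq, Bool.not_eq_true', decide_eq_false_iff_not]
        exact ⟨List.count_pos_iff.1 (by omega), by omega⟩
      simp only [hcond, if_pos]
      rw [ih (pre ++ [a]) (i + 1) (rep ++ [a]) ?_ (PySem.Set.add vis a) hvis']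
      · rw [specP, if_pos hc]
        simp
      · intro x
        by_cases hx : x = a
        · subst hx
          simp [List.count_append, hc]
        · simp [List.count_append, hrep x, hx, Ne.symm hx]
    · have hcond : (PySem.Set.contains vis a && !(rep.contains a)) = false := by
        rw [hca, hra]
        rcases Nat.lt_or_ge (pre.count a) 1 with h | h
        · have : a ∉ pre := by
            intro hm
            exact absurd (List.count_pos_iff.2 hm) (by omega)
          simp [this]
        · have h2 : 2 ≤ pre.count a := by omega
          simp [h2]
      simp only [hcond, Bool.false_eq_true, if_false]
      rw [ih (pre ++ [a]) (i + 1) rep ?_ (PySem.Set.add vis a) hvis']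
      · rw [specP, if_neg hc]
      · intro x
        by_cases hx : x = a
        · subst hx
          have h1 : List.count x [x] = 1 := by simp
          rw [hrep x, List.count_append, h1]
          omega
        · simp [List.count_append, hrep x, Ne.symm hx]

lemma dict_eq (lista : List Int) :
    ((PySem.List.enumerate lista).foldl
        (fun d p => d.modify p.2 [] (fun idxs => idxs ++ [p.1])) PySem.Dict.empty) =
    (((PySem.List.enumerate lista).map Prod.swap).foldl
        (fun d (q : Int × Int) => d.modify q.1 [] (fun idxs => idxs ++ [q.2])) PySem.Dict.empty) := by
  rw [List.foldl_map]
  rfl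

lemma getD_dict (lista : List Int) (c : Int) :
    (((PySem.List.enumerate lista).foldl
        (fun d p => d.modify p.2 [] (fun idxs => idxs ++ [p.1])) PySem.Dict.empty)).getD c [] =
      occIdx lista c := by
  rw [dict_eq, PySem.Dict.getD_foldl_modify_append]
  rw [List.filter_map, List.map_map]
  simp [occIdx, Prod.swap, Function.comp_def]

lemma keys_dict (lista : List Int) :
    (((PySem.List.enumerate lista).foldl
        (fun d p => d.modify p.2 [] (fun idxs => idxs ++ [p.1])) PySem.Dict.empty)).keys =
      PySem.Set.ofList lista := by
  rw [PySem.Dict.keys_foldl_modify_key (key := fun p : Int × Int => p.2)]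
  rw [PySem.Dict.keys_empty, PySem.Set.update_nil_left, PySem.List.map_snd_enumerate]

lemma nodup_keys_dict (lista : List Int) :
    (((PySem.List.enumerate lista).foldl
        (fun d p => d.modify p.2 [] (fun idxs => idxs ++ [p.1])) PySem.Dict.empty)).keys.Nodup := by
  apply PySem.Dict.nodup_keys_foldl_modify_key
  simp [PySem.Dict.keys_empty]

lemma pares_eq (lista : List Int) :
    (((PySem.List.enumerate lista).foldl
        (fun d p => d.modify p.2 [] (fun idxs => idxs ++ [p.1])) PySem.Dict.empty).items.filterMap
      (fun kv : Int × List Int =>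
        match kv.2 with
        | _ :: i2 :: _ => some (i2, kv.1)
        | _ => none)) =
    (PySem.Set.ofList lista).filterMap
      (fun c : Int =>
        match occIdx lista c with
        | _ :: i2 :: _ => some (i2, c)
        | _ => none) := by
  rw [PySem.Dict.items_eq_map_keys _ (nodup_keys_dict lista) []]
  rw [List.filterMap_map]
  rw [keys_dict]
  apply List.filterMap_congr
  intro c _
  simp only [Function.comp_apply, getD_dict]

lemma match2_eq (ys : List Int) (c j x : Int) :
    (match ys with | _ :: i2 :: _ => some (i2, c) | _ => none) = some (j, x) ↔
      ys[1]? = some j ∧ c = x := by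
  match ys with
  | [] => simp
  | [a] => simp
  | a :: b :: t =>
    simp only [List.getElem?_cons_succ, List.getElem?_cons_zero, Option.some.injEq, Prod.mk.injEq]

lemma mem_pares (lista : List Int) (j x : Int) :
    ((j, x) ∈ (PySem.Set.ofList lista).filterMap
      (fun c : Int =>
        match occIdx lista c with
        | _ :: i2 :: _ => some (i2, c)
        | _ => none)) ↔
      ∃ k : Nat, j = (k : Int) ∧ ∃ hk : k < lista.length, lista[k] = x ∧ (lista.take k).count x = 1 := by
  rw [List.mem_filterMap]
  constructor
  · rintro ⟨c, _, hg⟩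
    obtain ⟨h1, hcx⟩ := (match2_eq _ c j x).1 hg
    subst hcx
    exact (getElem?_occIdx lista c 1 j).1 h1
  · rintro ⟨k, hj, hk, hx, hc⟩
    refine ⟨x, (PySem.Set.mem_ofList _ _).2 (hx ▸ lista.getElem_mem hk), ?_⟩
    exact (match2_eq _ x j x).2 ⟨(getElem?_occIdx lista x 1 j).2 ⟨k, hj, hk, hx, hc⟩, rfl⟩

lemma nodup_pares (lista : List Int) :
    ((PySem.Set.ofList lista).filterMap
      (fun c : Int =>
        match occIdx lista c with
        | _ :: i2 :: _ => some (i2, c)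
        | _ => none)).Nodup := by
  apply List.Nodup.filterMap _ (PySem.Set.nodup_ofList lista)
  intro a a' b hb hb'
  have h1 := (match2_eq _ a b.1 b.2).1 (by simpa using hb)
  have h2 := (match2_eq _ a' b.1 b.2).1 (by simpa using hb')
  rw [h1.2, h2.2]

lemma sorted_pares_eq_specP (lista : List Int) :
    PySem.List.sorted
      ((PySem.Set.ofList lista).filterMap
        (fun c : Int =>
          match occIdx lista c with
          | _ :: i2 :: _ => some (i2, c)
          | _ => none))
      (fun par => par.1) false = specP [] lista 0 := by
  apply PySem.List.sorted_eq_of_perm_of_pairwise_lt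
  · apply (List.perm_ext_iff_of_nodup ?_ (nodup_pares lista)).2
    · intro p
      obtain ⟨j, x⟩ := p
      rw [mem_specP, mem_pares]
      simp
    · exact (pairwise_specP [] lista 0).imp (fun h heq => absurd (heq ▸ h) (lt_irrefl _))
  · exact pairwise_specP [] lista 0

-- ===== VERDICT (by name: the statement is the Claim_ definition above) =====
theorem encontrar_repetidos_spec : Claim_equal_encontrar_repetidos := by
  intro lista _
  unfold Spec_encontrar_repetidos encontrar_repetidos encontrar_repetidos_alt
  dsimp only
  rw [pares_eq, sorted_pares_eq_specP]
  rw [foldA_eq lista [] 0 [] (by simp) PySem.Set.empty (by simp [PySem.Set.empty])]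
  simp
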